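-- pv_equiv track=rewrite | github.com/bozi6/hello-world | 08robot/08_robot1.py | robot_mozgasanak_szimulalasa
-- ===== SOURCE A (Python) =====
-- IRANYOK = {'E': (0, 1), 'D': (0, -1), 'K': (1, 0), 'N': (-1, 0)}
--
-- def robot_mozgasanak_szimulalasa(utasitas_sor):
--     """Szimulálja a robot mozgását és visszaadja a végkoordinátákat és a legnagyobb távolságot"""
--     x_koordinata, y_koordinata = 0, 0
--     max_tavolsag_negyzetben = 0
--     max_tavolsag_lepese = 0
--
--     for lepes_index, irany in enumerate(utasitas_sor):
--         if irany in IRANYOK: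
--             dx, dy = IRANYOK[irany]
--             x_koordinata += dx
--             y_koordinata += dy
--
--             tavolsag_negyzetben = x_koordinata * x_koordinata + y_koordinata * y_koordinata
--             if tavolsag_negyzetben > max_tavolsag_negyzetben:
--                 max_tavolsag_negyzetben = tavolsag_negyzetben
--                 max_tavolsag_lepese = lepes_index + 1
--
--     return x_koordinata, y_koordinata, max_tavolsag_negyzetben, max_tavolsag_lepese
-- ===== SOURCE B (Python) =====
-- IRANYOK = {'E': (0, 1), 'D': (0, -1), 'K': (1, 0), 'N': (-1, 0)}
--
-- def robot_mozgasanak_szimulalasa(utasitas_sor):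
--     """Two-pass: build the full prefix-position list (invalid characters become
--     zero moves), then pick max squared distance and its first step via max/index."""
--     moves = [IRANYOK.get(c, (0, 0)) for c in utasitas_sor]
--     x, y = 0, 0
--     positions = [(0, 0)]
--     for dx, dy in moves:
--         x += dx
--         y += dy
--         positions.append((x, y))
--     dists = [px * px + py * py for px, py in positions]
--     best = max(dists)
--     return x, y, best, dists.index(best)
-- ===== Notes on version B (the rewrite author's own statement) =====
-- stated objective: alternative
-- what changed: A tracks the running max squared distance and its step inside one fold; B first materialises the full prefix-position list (invalid characters as zero moves), then computes the distance list and picks the maximum and its first index with max/list.index.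
import Mathlib
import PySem

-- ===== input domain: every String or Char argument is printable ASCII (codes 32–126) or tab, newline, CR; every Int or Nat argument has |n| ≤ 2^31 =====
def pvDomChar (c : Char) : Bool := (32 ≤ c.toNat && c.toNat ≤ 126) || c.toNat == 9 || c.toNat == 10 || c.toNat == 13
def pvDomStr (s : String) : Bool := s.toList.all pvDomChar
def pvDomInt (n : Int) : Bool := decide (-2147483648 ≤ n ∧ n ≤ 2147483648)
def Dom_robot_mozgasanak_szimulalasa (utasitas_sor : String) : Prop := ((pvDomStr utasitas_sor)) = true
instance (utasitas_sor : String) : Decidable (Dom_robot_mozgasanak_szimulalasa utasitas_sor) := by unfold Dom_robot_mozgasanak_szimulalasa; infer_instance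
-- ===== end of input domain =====

-- B re-decomposes A's single running-max loop into two passes (prefix-position list, then max/index);
-- same O(n) cost, objective: alternative decomposition.

-- ===== PORT A =====
def IRANYOK : PySem.Dict Char (Int × Int) :=
  PySem.Dict.ofList [('E', (0, 1)), ('D', (0, -1)), ('K', (1, 0)), ('N', (-1, 0))]

def robot_mozgasanak_szimulalasa (utasitas_sor : String) : Int × Int × Int × Int :=
  (PySem.List.enumerate utasitas_sor.toList 0).foldl
    (fun (st : Int × Int × Int × Int) (p : Int × Char) =>
      match PySem.Dict.get? IRANYOK p.2 with
      | some d =>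
          let x := st.1 + d.1
          let y := st.2.1 + d.2
          let t := x * x + y * y
          if t > st.2.2.1 then (x, y, t, p.1 + 1) else (x, y, st.2.2.1, st.2.2.2)
      | none => st)
    (0, 0, 0, 0)

-- ===== PORT B =====
def robot_mozgasanak_szimulalasa_alt (utasitas_sor : String) : Int × Int × Int × Int :=
  let moves := utasitas_sor.toList.map (fun c => PySem.Dict.getD IRANYOK c (0, 0))
  let st := moves.foldl
    (fun (st : Int × Int × List (Int × Int)) d =>
      let x := st.1 + d.1
      let y := st.2.1 + d.2
      (x, y, st.2.2 ++ [(x, y)]))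
    (0, 0, [((0 : Int), (0 : Int))])
  let dists := st.2.2.map (fun p => p.1 * p.1 + p.2 * p.2)
  let best := (PySem.List.max? dists (fun v => v)).getD 0
  (st.1, st.2.1, best, (((PySem.List.index? dists best).getD 0 : Nat) : Int))

-- ===== PRECONDITION & SPEC =====
def Spec_robot_mozgasanak_szimulalasa (utasitas_sor : String) (out : Int × Int × Int × Int) : Prop := out = robot_mozgasanak_szimulalasa_alt utasitas_sor
instance (utasitas_sor : String) (out : Int × Int × Int × Int) : Decidable (Spec_robot_mozgasanak_szimulalasa utasitas_sor out) := by unfold Spec_robot_mozgasanak_szimulalasa; infer_instance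

-- ===== CLAIM (what is proved, stated in full; the proofs are below) =====
def Claim_equal_robot_mozgasanak_szimulalasa : Prop := ∀ (utasitas_sor : String), Dom_robot_mozgasanak_szimulalasa utasitas_sor → Spec_robot_mozgasanak_szimulalasa utasitas_sor (robot_mozgasanak_szimulalasa utasitas_sor)

-- ===== LEMMAS AND PROOFS =====

-- proof-side copies of the two loop bodies / folds
def pvFA (st : Int × Int × Int × Int) (p : Int × Char) : Int × Int × Int × Int :=
  match PySem.Dict.get? IRANYOK p.2 with
  | some d =>
      let x := st.1 + d.1
      let y := st.2.1 + d.2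
      let t := x * x + y * y
      if t > st.2.2.1 then (x, y, t, p.1 + 1) else (x, y, st.2.2.1, st.2.2.2)
  | none => st

def pvFB (st : Int × Int × List (Int × Int)) (d : Int × Int) : Int × Int × List (Int × Int) :=
  let x := st.1 + d.1
  let y := st.2.1 + d.2
  (x, y, st.2.2 ++ [(x, y)])

def pvStA (cs : List Char) : Int × Int × Int × Int :=
  (PySem.List.enumerate cs 0).foldl pvFA (0, 0, 0, 0)

def pvStB (cs : List Char) : Int × Int × List (Int × Int) :=
  (cs.map (fun c => PySem.Dict.getD IRANYOK c (0, 0))).foldl pvFB (0, 0, [((0 : Int), (0 : Int))])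

def pvSq (p : Int × Int) : Int := p.1 * p.1 + p.2 * p.2

lemma pvMax?_snoc (l : List Int) (m d : Int) (h : PySem.List.max? l (fun v => v) = some m) :
    PySem.List.max? (l ++ [d]) (fun v => v) = some (max m d) := by
  cases l with
  | nil =>
      rw [show PySem.List.max? ([] : List Int) (fun v => v) = none from rfl] at h
      cases h
  | cons x t =>
      rw [PySem.List.max?_id_cons] at h
      rw [List.cons_append, PySem.List.max?_id_cons, List.foldl_append]
      simp_all

lemma pvStA_snoc (cs : List Char) (c : Char) :
    pvStA (cs ++ [c]) = pvFA (pvStA cs) ((cs.length : Int), c) := by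
  unfold pvStA
  rw [PySem.List.enumerate_append, List.foldl_append]
  simp [PySem.List.enumerate_cons, PySem.List.enumerate_nil]

lemma pvStB_snoc (cs : List Char) (c : Char) :
    pvStB (cs ++ [c]) = pvFB (pvStB cs) (PySem.Dict.getD IRANYOK c (0, 0)) := by
  unfold pvStB
  rw [List.map_append, List.foldl_append]
  rfl

lemma pvInv (cs : List Char) :
    (pvStB cs).1 = (pvStA cs).1 ∧
    (pvStB cs).2.1 = (pvStA cs).2.1 ∧
    (pvStB cs).2.2.length = cs.length + 1 ∧
    (pvStB cs).2.2.getLast? = some ((pvStA cs).1, (pvStA cs).2.1) ∧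
    PySem.List.max? ((pvStB cs).2.2.map pvSq) (fun v => v) = some (pvStA cs).2.2.1 ∧
    0 ≤ (pvStA cs).2.2.2 ∧
    PySem.List.index? ((pvStB cs).2.2.map pvSq) (pvStA cs).2.2.1 = some (pvStA cs).2.2.2.toNat := by
  induction cs using List.reverseRecOn with
  | nil => decide
  | append_singleton cs c ih =>
      obtain ⟨hx, hy, hlen, hlast, hmax, hnn, hidx⟩ := ih
      rw [pvStA_snoc, pvStB_snoc]
      set A := pvStA cs with hA
      set B := pvStB cs with hB
      have hmemLast : (A.1, A.2.1) ∈ B.2.2 := List.mem_of_getLast? hlast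
      have hmemSq : pvSq (A.1, A.2.1) ∈ B.2.2.map pvSq := List.mem_map_of_mem hmemLast
      have hle_all : ∀ v ∈ B.2.2.map pvSq, v ≤ A.2.2.1 := by
        intro v hv
        exact PySem.List.max?_isMax hmax v hv
      have hmdmem : A.2.2.1 ∈ B.2.2.map pvSq := PySem.List.max?_mem hmax
      unfold pvFA pvFB
      cases hg : PySem.Dict.get? IRANYOK c with
      | none =>
          -- invalid character: zero move, appended distance already ≤ max
          have hdlt : PySem.Dict.getD IRANYOK c (0, 0) = ((0 : Int), (0 : Int)) := by
            simp [PySem.Dict.getD_eq_get?_getD, hg]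
          rw [hdlt]
          dsimp only
          have hnewsq : pvSq (B.1 + 0, B.2.1 + 0) ≤ A.2.2.1 := by
            have := hle_all _ hmemSq
            simpa [pvSq, hx, hy] using this
          refine ⟨by simp [hx], by simp [hy], by simp [hlen], by simp [hx, hy], ?_, hnn, ?_⟩
          · simp only [List.map_append, List.map_cons, List.map_nil]
            rw [pvMax?_snoc _ _ _ hmax]
            have : max A.2.2.1 (pvSq (B.1 + 0, B.2.1 + 0)) = A.2.2.1 := max_eq_left hnewsq
            simpa [pvSq] using this
          · simp only [List.map_append, List.map_cons, List.map_nil]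
            rw [PySem.List.index?_append_of_mem _ hmdmem]
            exact hidx
      | some d =>
          have hdlt : PySem.Dict.getD IRANYOK c (0, 0) = d := by
            simp [PySem.Dict.getD_eq_get?_getD, hg]
          rw [hdlt]
          dsimp only
          rw [hx, hy]
          set x' := A.1 + d.1 with hx'
          set y' := A.2.1 + d.2 with hy'
          set t := x' * x' + y' * y' with ht
          by_cases hgt : t > A.2.2.1
          · -- new strict max: first occurrence is the fresh entry
            have hnotmem : t ∉ B.2.2.map pvSq := by
              intro hmem
              have := hle_all _ hmem
              omega
            rw [if_pos hgt]
            refine ⟨rfl, rfl, by simp [hlen], by simp, ?_, by dsimp only; omega, ?_⟩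
            · simp only [List.map_append, List.map_cons, List.map_nil]
              rw [pvMax?_snoc _ _ _ hmax]
              have hsq : pvSq (x', y') = t := rfl
              rw [hsq, max_eq_right (le_of_lt hgt)]
            · simp only [List.map_append, List.map_cons, List.map_nil]
              have hsq : pvSq (x', y') = t := rfl
              rw [hsq, PySem.List.index?_append_singleton_self _ _ hnotmem]
              congr 1
              rw [List.length_map, hlen]
              omega
          · rw [if_neg hgt]
            have hle : t ≤ A.2.2.1 := by omega
            refine ⟨rfl, rfl, by simp [hlen], by simp, ?_, hnn, ?_⟩
            · simp only [List.map_append, List.map_cons, List.map_nil]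
              rw [pvMax?_snoc _ _ _ hmax]
              have hsq : pvSq (x', y') = t := rfl
              rw [hsq, max_eq_left hle]
            · simp only [List.map_append, List.map_cons, List.map_nil]
              rw [PySem.List.index?_append_of_mem _ hmdmem]
              exact hidx

-- ===== VERDICT (by name: the statement is the Claim_ definition above) =====
theorem robot_mozgasanak_szimulalasa_spec : Claim_equal_robot_mozgasanak_szimulalasa := by
  intro s _
  unfold Spec_robot_mozgasanak_szimulalasa
  show robot_mozgasanak_szimulalasa s = robot_mozgasanak_szimulalasa_alt s
  have hA : robot_mozgasanak_szimulalasa s = pvStA s.toList := rfl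
  have hB : robot_mozgasanak_szimulalasa_alt s
      = ((pvStB s.toList).1, (pvStB s.toList).2.1,
         ((PySem.List.max? ((pvStB s.toList).2.2.map pvSq) (fun v => v)).getD 0),
         (((PySem.List.index? ((pvStB s.toList).2.2.map pvSq)
             ((PySem.List.max? ((pvStB s.toList).2.2.map pvSq) (fun v => v)).getD 0)).getD 0 : Nat) : Int)) := rfl
  obtain ⟨hx, hy, _, _, hmax, hnn, hidx⟩ := pvInv s.toList
  rw [hA, hB, hx, hy, hmax]
  simp only [Option.getD_some]
  rw [hidx]
  simp [Int.toNat_of_nonneg hnn]
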